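-- pv_equiv track=rewrite | github.com/YUHANYU/Gigaword_V5_Process | process.py | has_index_alphabet
-- ===== SOURCE A (Python) =====
-- def has_index_alphabet(target_str):
--     index = [i for i in range(1, 15, 1)]
--     alphabet = ['a', 'b', 'c', 'd', 'e', 'f', 'g', 'h', 'i', 'j', 'k', 'l', 'm', 'n', 'o', 'p', 'q', 'r', 's', 't',
--                 'u', 'v', 'w', 'x', 'y', 'z']
--
--     for i in index:
--         for j in alphabet:
--             if (str(i) + '. ' + j.upper()) in target_str:
--                 return True
--
--     return False
-- ===== SOURCE B (Python) =====
-- def has_index_alphabet(target_str):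
--     s = target_str
--     while s:
--         if len(s) >= 4 and '1' <= s[0] <= '9' and s[1] == '.' and s[2] == ' ' and 'A' <= s[3] <= 'Z':
--             return True
--         if len(s) >= 5 and s[0] == '1' and s[1] == '0' and s[2] == '.' and s[3] == ' ' and 'A' <= s[4] <= 'Z':
--             return True
--         s = s[1:]
--     return False
-- ===== Notes on version B (the rewrite author's own statement) =====
-- stated objective: alternative
-- what changed: A tests all 364 candidate patterns str(i)+'. '+J with a separate substring search each; B makes a single left-to-right scan over the string, checking at each position for a digit 1-9 (or '10') followed by '. ' and an uppercase letter, using the fact that every two-digit pattern 11-14 contains a one-digit one.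
import Mathlib
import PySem

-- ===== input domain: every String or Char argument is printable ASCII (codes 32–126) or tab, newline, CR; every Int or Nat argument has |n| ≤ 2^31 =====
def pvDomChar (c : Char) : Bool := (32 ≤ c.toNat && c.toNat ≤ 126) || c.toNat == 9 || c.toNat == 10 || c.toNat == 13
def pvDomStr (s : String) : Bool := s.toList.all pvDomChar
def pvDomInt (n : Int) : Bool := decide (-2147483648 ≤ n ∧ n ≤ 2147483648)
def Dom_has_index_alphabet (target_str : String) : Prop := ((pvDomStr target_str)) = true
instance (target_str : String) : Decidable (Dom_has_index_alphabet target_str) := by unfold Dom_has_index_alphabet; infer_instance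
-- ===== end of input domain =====

-- B replaces A's 364 substring searches by a single left-to-right scan for a digit 1–9 (or "10")
-- followed by ". " and an uppercase letter — same result by one pass (objective: alternative).

-- ===== PORT A =====
def pvAlphabet : List Char :=
  ['a','b','c','d','e','f','g','h','i','j','k','l','m','n','o','p','q','r','s','t',
   'u','v','w','x','y','z']

-- 'for i in index: for j in alphabet: if (str(i)+'. '+j.upper()) in target_str: return True'
def has_index_alphabet (target_str : String) : Bool :=
  (PySem.List.pyRange 1 15 1).any (fun i =>
    pvAlphabet.any (fun j =>
      PySem.Chars.isIn (PySem.Int.toChars i ++ ['.', ' '] ++ PySem.Chars.upper [j])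
        target_str.toList))

-- ===== PORT B =====
-- first 'if' of Source B's loop body: s[0] in '1'..'9', then '. ', then an uppercase letter
def pvHit1 : List Char → Bool
  | c :: '.' :: ' ' :: u :: _ =>
      (decide ('1' ≤ c) && decide (c ≤ '9')) && (decide ('A' ≤ u) && decide (u ≤ 'Z'))
  | _ => false

-- second 'if' of Source B's loop body: "10. " then an uppercase letter
def pvHit2 : List Char → Bool
  | '1' :: '0' :: '.' :: ' ' :: u :: _ => decide ('A' ≤ u) && decide (u ≤ 'Z')
  | _ => false

-- Source B's 'while s: … s = s[1:]' loop as recursion on the character list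
def pvScan : List Char → Bool
  | [] => false
  | c :: rest => pvHit1 (c :: rest) || pvHit2 (c :: rest) || pvScan rest

def has_index_alphabet_alt (target_str : String) : Bool :=
  pvScan target_str.toList

-- ===== PRECONDITION & SPEC =====
def Spec_has_index_alphabet (target_str : String) (out : Bool) : Prop := out = has_index_alphabet_alt target_str
instance (target_str : String) (out : Bool) : Decidable (Spec_has_index_alphabet target_str out) := by unfold Spec_has_index_alphabet; infer_instance

-- ===== CLAIM (what is proved, stated in full; the proofs are below) =====
def Claim_equal_has_index_alphabet : Prop := ∀ (target_str : String), Dom_has_index_alphabet target_str → Spec_has_index_alphabet target_str (has_index_alphabet target_str)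

-- ===== LEMMAS AND PROOFS =====

-- A = true iff some pattern str(i) + '. ' + J is a contiguous substring
theorem pvA_iff (s : String) :
    has_index_alphabet s = true ↔
      ∃ i ∈ PySem.List.pyRange 1 15 1, ∃ j ∈ pvAlphabet,
        (PySem.Int.toChars i ++ ['.', ' '] ++ PySem.Chars.upper [j]) <:+: s.toList := by
  simp [has_index_alphabet, List.any_eq_true, PySem.Chars.isIn_iff_infix]

-- B = true iff some suffix starts with one of the two shapes
theorem pvScan_iff (l : List Char) :
    pvScan l = true ↔ ∃ t, t <:+ l ∧ (pvHit1 t = true ∨ pvHit2 t = true) := by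
  induction l with
  | nil =>
      constructor
      · intro h; simp [pvScan] at h
      · rintro ⟨t, ht, hh⟩
        rw [List.suffix_nil.mp ht] at hh
        simp [pvHit1, pvHit2] at hh
  | cons c rest ih =>
      simp only [pvScan, Bool.or_eq_true, ih]
      constructor
      · rintro ((h | h) | ⟨t, hts, hh⟩)
        · exact ⟨c :: rest, List.suffix_refl _, Or.inl h⟩
        · exact ⟨c :: rest, List.suffix_refl _, Or.inr h⟩
        · exact ⟨t, hts.trans (List.suffix_cons c rest), hh⟩
      · rintro ⟨t, hts, hh⟩
        rcases List.suffix_cons_iff.mp hts with rfl | hts'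
        · rcases hh with h | h
          · exact Or.inl (Or.inl h)
          · exact Or.inl (Or.inr h)
        · exact Or.inr ⟨t, hts', hh⟩

theorem pvDigit_mem (c : Char) (h1 : '1' ≤ c) (h2 : c ≤ '9') :
    c ∈ ['1','2','3','4','5','6','7','8','9'] := by
  have hofn : Char.ofNat c.toNat = c := Char.ofNat_toNat c
  have b1 : 49 ≤ c.toNat := h1
  have b2 : c.toNat ≤ 57 := h2
  interval_cases h : c.toNat <;> rw [← hofn] <;> decide

theorem pvUpper_mem (u : Char) (h1 : 'A' ≤ u) (h2 : u ≤ 'Z') :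
    u ∈ ['A','B','C','D','E','F','G','H','I','J','K','L','M','N','O','P','Q','R','S','T',
         'U','V','W','X','Y','Z'] := by
  have hofn : Char.ofNat u.toNat = u := Char.ofNat_toNat u
  have b1 : 65 ≤ u.toNat := h1
  have b2 : u.toNat ≤ 90 := h2
  interval_cases h : u.toNat <;> rw [← hofn] <;> decide

-- each digit char 1..9 is str(i) for some i in range(1, 15)
theorem pvDigit_toChars (c : Char) (h : c ∈ ['1','2','3','4','5','6','7','8','9']) :
    ∃ i ∈ PySem.List.pyRange 1 15 1, PySem.Int.toChars i = [c] := by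
  fin_cases h
  · exact ⟨1, by decide, by decide⟩
  · exact ⟨2, by decide, by decide⟩
  · exact ⟨3, by decide, by decide⟩
  · exact ⟨4, by decide, by decide⟩
  · exact ⟨5, by decide, by decide⟩
  · exact ⟨6, by decide, by decide⟩
  · exact ⟨7, by decide, by decide⟩
  · exact ⟨8, by decide, by decide⟩
  · exact ⟨9, by decide, by decide⟩

-- each uppercase letter is j.upper() for some j in the alphabet
theorem pvUpper_ofAlpha (u : Char)
    (h : u ∈ ['A','B','C','D','E','F','G','H','I','J','K','L','M','N','O','P','Q','R','S','T',
              'U','V','W','X','Y','Z']) :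
    ∃ j ∈ pvAlphabet, PySem.Chars.upper [j] = [u] := by
  fin_cases h
  · exact ⟨'a', by decide, by decide⟩
  · exact ⟨'b', by decide, by decide⟩
  · exact ⟨'c', by decide, by decide⟩
  · exact ⟨'d', by decide, by decide⟩
  · exact ⟨'e', by decide, by decide⟩
  · exact ⟨'f', by decide, by decide⟩
  · exact ⟨'g', by decide, by decide⟩
  · exact ⟨'h', by decide, by decide⟩
  · exact ⟨'i', by decide, by decide⟩
  · exact ⟨'j', by decide, by decide⟩
  · exact ⟨'k', by decide, by decide⟩
  · exact ⟨'l', by decide, by decide⟩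
  · exact ⟨'m', by decide, by decide⟩
  · exact ⟨'n', by decide, by decide⟩
  · exact ⟨'o', by decide, by decide⟩
  · exact ⟨'p', by decide, by decide⟩
  · exact ⟨'q', by decide, by decide⟩
  · exact ⟨'r', by decide, by decide⟩
  · exact ⟨'s', by decide, by decide⟩
  · exact ⟨'t', by decide, by decide⟩
  · exact ⟨'u', by decide, by decide⟩
  · exact ⟨'v', by decide, by decide⟩
  · exact ⟨'w', by decide, by decide⟩
  · exact ⟨'x', by decide, by decide⟩
  · exact ⟨'y', by decide, by decide⟩
  · exact ⟨'z', by decide, by decide⟩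

-- j.upper() for j in the alphabet is a single uppercase letter
theorem pvUpper_shape (j : Char) (h : j ∈ pvAlphabet) :
    ∃ u, PySem.Chars.upper [j] = [u] ∧ 'A' ≤ u ∧ u ≤ 'Z' := by
  fin_cases h <;> exact ⟨_, rfl, by decide, by decide⟩

-- an infix of shape [c, '.', ' ', u] yields a suffix satisfying pvHit1
theorem pvHit1_of_infix (l : List Char) (c u : Char)
    (hinf : [c, '.', ' ', u] <:+: l)
    (hc1 : '1' ≤ c) (hc2 : c ≤ '9') (hu1 : 'A' ≤ u) (hu2 : u ≤ 'Z') :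
    ∃ t, t <:+ l ∧ (pvHit1 t = true ∨ pvHit2 t = true) := by
  obtain ⟨t, hpre, hsuf⟩ := List.infix_iff_prefix_suffix.mp hinf
  obtain ⟨r, rfl⟩ := hpre
  refine ⟨_, hsuf, Or.inl ?_⟩
  simp [pvHit1, hc1, hc2, hu1, hu2]

-- an infix of shape ['1', '0', '.', ' ', u] yields a suffix satisfying pvHit2
theorem pvHit2_of_infix (l : List Char) (u : Char)
    (hinf : ['1', '0', '.', ' ', u] <:+: l) (hu1 : 'A' ≤ u) (hu2 : u ≤ 'Z') :
    ∃ t, t <:+ l ∧ (pvHit1 t = true ∨ pvHit2 t = true) := by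
  obtain ⟨t, hpre, hsuf⟩ := List.infix_iff_prefix_suffix.mp hinf
  obtain ⟨r, rfl⟩ := hpre
  refine ⟨_, hsuf, Or.inr ?_⟩
  simp [pvHit2]
  exact ⟨hu1, hu2⟩

-- the shapes pvHit1 / pvHit2 accept
theorem pvHit1_shape (t : List Char) (h : pvHit1 t = true) :
    ∃ c u rest, t = c :: '.' :: ' ' :: u :: rest ∧ '1' ≤ c ∧ c ≤ '9' ∧ 'A' ≤ u ∧ u ≤ 'Z' := by
  unfold pvHit1 at h
  split at h
  next c u rest =>
    simp only [Bool.and_eq_true, decide_eq_true_eq] at h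
    exact ⟨c, u, rest, rfl, h.1.1, h.1.2, h.2.1, h.2.2⟩
  next => simp at h

theorem pvHit2_shape (t : List Char) (h : pvHit2 t = true) :
    ∃ u rest, t = '1' :: '0' :: '.' :: ' ' :: u :: rest ∧ 'A' ≤ u ∧ u ≤ 'Z' := by
  unfold pvHit2 at h
  split at h
  next u rest =>
    simp only [Bool.and_eq_true, decide_eq_true_eq] at h
    exact ⟨u, rest, rfl, h.1, h.2⟩
  next => simp at h

theorem pvMain (l : List Char) :
    (∃ i ∈ PySem.List.pyRange 1 15 1, ∃ j ∈ pvAlphabet,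
        (PySem.Int.toChars i ++ ['.', ' '] ++ PySem.Chars.upper [j]) <:+: l) ↔
      ∃ t, t <:+ l ∧ (pvHit1 t = true ∨ pvHit2 t = true) := by
  constructor
  · rintro ⟨i, hi, j, hj, hinf⟩
    obtain ⟨u, hup, hu1, hu2⟩ := pvUpper_shape j hj
    rw [hup] at hinf
    have hi' := (PySem.List.mem_pyRange_one).mp hi
    have h1 : (1:Int) ≤ i := hi'.1
    have h2 : i < 15 := hi'.2
    interval_cases i
    · exact pvHit1_of_infix l '1' u hinf (by decide) (by decide) hu1 hu2
    · exact pvHit1_of_infix l '2' u hinf (by decide) (by decide) hu1 hu2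
    · exact pvHit1_of_infix l '3' u hinf (by decide) (by decide) hu1 hu2
    · exact pvHit1_of_infix l '4' u hinf (by decide) (by decide) hu1 hu2
    · exact pvHit1_of_infix l '5' u hinf (by decide) (by decide) hu1 hu2
    · exact pvHit1_of_infix l '6' u hinf (by decide) (by decide) hu1 hu2
    · exact pvHit1_of_infix l '7' u hinf (by decide) (by decide) hu1 hu2
    · exact pvHit1_of_infix l '8' u hinf (by decide) (by decide) hu1 hu2
    · exact pvHit1_of_infix l '9' u hinf (by decide) (by decide) hu1 hu2
    · exact pvHit2_of_infix l u hinf hu1 hu2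
    · -- "11. U" contains "1. U"
      have : ['1', '.', ' ', u] <:+: l :=
        (List.suffix_cons '1' ['1', '.', ' ', u]).isInfix.trans hinf
      exact pvHit1_of_infix l '1' u this (by decide) (by decide) hu1 hu2
    · have : ['2', '.', ' ', u] <:+: l :=
        (List.suffix_cons '1' ['2', '.', ' ', u]).isInfix.trans hinf
      exact pvHit1_of_infix l '2' u this (by decide) (by decide) hu1 hu2
    · have : ['3', '.', ' ', u] <:+: l :=
        (List.suffix_cons '1' ['3', '.', ' ', u]).isInfix.trans hinf
      exact pvHit1_of_infix l '3' u this (by decide) (by decide) hu1 hu2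
    · have : ['4', '.', ' ', u] <:+: l :=
        (List.suffix_cons '1' ['4', '.', ' ', u]).isInfix.trans hinf
      exact pvHit1_of_infix l '4' u this (by decide) (by decide) hu1 hu2
  · rintro ⟨t, hsuf, hh⟩
    rcases hh with h | h
    · obtain ⟨c, u, rest, rfl, hc1, hc2, hu1, hu2⟩ := pvHit1_shape t h
      obtain ⟨i, hi, hic⟩ := pvDigit_toChars c (pvDigit_mem c hc1 hc2)
      obtain ⟨j, hj, hju⟩ := pvUpper_ofAlpha u (pvUpper_mem u hu1 hu2)
      refine ⟨i, hi, j, hj, ?_⟩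
      rw [hic, hju]
      exact ((List.prefix_append [c, '.', ' ', u] rest).isInfix).trans hsuf.isInfix
    · obtain ⟨u, rest, rfl, hu1, hu2⟩ := pvHit2_shape t h
      obtain ⟨j, hj, hju⟩ := pvUpper_ofAlpha u (pvUpper_mem u hu1 hu2)
      refine ⟨10, by decide, j, hj, ?_⟩
      rw [hju]
      show (['1','0'] ++ ['.', ' '] ++ [u]) <:+: l
      exact ((List.prefix_append ['1','0','.',' ',u] rest).isInfix).trans hsuf.isInfix

-- ===== VERDICT (by name: the statement is the Claim_ definition above) =====
theorem has_index_alphabet_spec : Claim_equal_has_index_alphabet := by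
  intro s _
  show has_index_alphabet s = has_index_alphabet_alt s
  have key : has_index_alphabet s = true ↔ has_index_alphabet_alt s = true := by
    rw [pvA_iff, has_index_alphabet_alt, pvScan_iff]
    exact pvMain s.toList
  cases ha : has_index_alphabet s <;> cases hb : has_index_alphabet_alt s <;> simp_all
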